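-- pv_equiv track=rewrite | github.com/ua-snap/rasdaman-ingest | benchmarks/get_zeus_capabilities.py | get_spatial_indices
-- ===== SOURCE A (Python) =====
-- from typing import Dict, List, Optional, Tuple
--
-- def get_spatial_indices(axis_list: List[str]) -> Optional[Tuple[int, int]]:
--     """
--     Returns the indices of the spatial axes in the axis list, or None if not found.
--     These should almost always be the last two axes in the list, but the names of these axes could vary a bit.
--     """
--     norms = [a.strip().lower() for a in axis_list]
--     x_like = {"x", "lon", "longitude"}
--     y_like = {"y", "lat", "latitude"}
--
--     xi = next((i for i, a in enumerate(norms) if a in x_like), None)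
--     yi = next((i for i, a in enumerate(norms) if a in y_like), None)
--     if xi is not None and yi is not None and xi != yi:
--         return xi, yi
--     return None
-- ===== SOURCE B (Python) =====
-- def get_spatial_indices(axis_list):
--     """Single reverse pass over (index, name): overwrite on match so the
--     leftmost (first) matching index wins; no separate scan per axis kind."""
--     xi = yi = None
--     for i, a in reversed(list(enumerate(axis_list))):
--         n = a.strip().lower()
--         if n in ("x", "lon", "longitude"):
--             xi = i
--         elif n in ("y", "lat", "latitude"):
--             yi = i
--     if xi is not None and yi is not None:
--         return xi, yi
--     return None
-- ===== Notes on version B (the rewrite author's own statement) =====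
-- stated objective: alternative
-- what changed: Replaces the two separate forward scans (plus a dead xi!=yi guard, which never fires since the name sets are disjoint) with a single reverse pass over enumerate(axis_list) that overwrites xi/yi on each match, so the first occurrence wins.
import Mathlib
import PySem

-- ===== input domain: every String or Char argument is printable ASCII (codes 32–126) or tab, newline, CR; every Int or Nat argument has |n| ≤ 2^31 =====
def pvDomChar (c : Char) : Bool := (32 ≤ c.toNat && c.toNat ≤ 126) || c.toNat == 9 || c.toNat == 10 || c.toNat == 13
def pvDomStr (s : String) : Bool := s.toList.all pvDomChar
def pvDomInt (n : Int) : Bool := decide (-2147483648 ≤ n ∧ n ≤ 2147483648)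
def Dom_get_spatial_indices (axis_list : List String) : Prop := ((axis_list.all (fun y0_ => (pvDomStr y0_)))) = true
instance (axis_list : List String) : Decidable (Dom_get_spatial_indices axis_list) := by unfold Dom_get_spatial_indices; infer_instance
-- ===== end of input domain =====

-- B replaces A's two forward scans (and the dead xi != yi guard) by one reverse pass
-- that overwrites xi/yi on each match, so the first occurrence wins (objective: alternative).

-- ===== PORT A =====
def get_spatial_indices (axis_list : List String) : Option (Int × Int) :=
  let norms := axis_list.map (fun a => PySem.Str.lower (PySem.Str.strip a))
  -- a in {"x","lon","longitude"} ported as the disjunction of equalities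
  let xi := ((PySem.List.enumerate norms).find?
      (fun p => p.2 == "x" || p.2 == "lon" || p.2 == "longitude")).map (·.1)
  let yi := ((PySem.List.enumerate norms).find?
      (fun p => p.2 == "y" || p.2 == "lat" || p.2 == "latitude")).map (·.1)
  match xi, yi with
  | some x, some y => if x ≠ y then some (x, y) else none
  | _, _ => none

-- ===== PORT B =====
def get_spatial_indices_alt (axis_list : List String) : Option (Int × Int) :=
  let st := (PySem.List.enumerate axis_list).reverse.foldl
    (fun (st : Option Int × Option Int) p =>
      let n := PySem.Str.lower (PySem.Str.strip p.2)
      if n == "x" || n == "lon" || n == "longitude" then (some p.1, st.2)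
      else if n == "y" || n == "lat" || n == "latitude" then (st.1, some p.1)
      else st) ((none : Option Int), (none : Option Int))
  -- 'return (xi, yi) if both are not None else None' via Option bind/map
  st.1.bind (fun x => st.2.map (fun y => (x, y)))

-- ===== PRECONDITION & SPEC =====
def Spec_get_spatial_indices (axis_list : List String) (out : Option (Int × Int)) : Prop := out = get_spatial_indices_alt axis_list
instance (axis_list : List String) (out : Option (Int × Int)) : Decidable (Spec_get_spatial_indices axis_list out) := by unfold Spec_get_spatial_indices; infer_instance

-- ===== CLAIM (what is proved, stated in full; the proofs are below) =====
def Claim_equal_get_spatial_indices : Prop := ∀ (axis_list : List String), Dom_get_spatial_indices axis_list → Spec_get_spatial_indices axis_list (get_spatial_indices axis_list)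

-- ===== LEMMAS AND PROOFS =====

-- the two normalized-name sets are disjoint, so A's xi != yi guard never fires
lemma xlike_not_ylike (s : String) :
    (s == "x" || s == "lon" || s == "longitude") = true →
    (s == "y" || s == "lat" || s == "latitude") = false := by
  intro h
  simp only [Bool.or_eq_true, beq_iff_eq] at h
  rcases h with (h | h) | h <;> subst h <;> decide

-- B's reverse fold computes exactly the first match of each predicate
lemma foldr_eq_finds (nm : String → String) (l : List (Int × String)) :
    l.foldr (fun p st =>
      let n := nm p.2
      if n == "x" || n == "lon" || n == "longitude" then (some p.1, st.2)
      else if n == "y" || n == "lat" || n == "latitude" then (st.1, some p.1)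
      else st) ((none : Option Int), (none : Option Int))
    = ((l.find? (fun p => nm p.2 == "x" || nm p.2 == "lon" || nm p.2 == "longitude")).map (·.1),
       (l.find? (fun p => nm p.2 == "y" || nm p.2 == "lat" || nm p.2 == "latitude")).map (·.1)) := by
  induction l with
  | nil => simp
  | cons p t ih =>
    rw [List.foldr_cons, ih]
    by_cases hx : (nm p.2 == "x" || nm p.2 == "lon" || nm p.2 == "longitude") = true
    · have hy := xlike_not_ylike _ hx
      simp [hx, hy]
    · by_cases hy : (nm p.2 == "y" || nm p.2 == "lat" || nm p.2 == "latitude") = true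
      · simp [hx, hy]
      · simp [hx, hy]

-- enumerate of a mapped list
lemma enumerate_map (f : String → String) (xs : List String) (s : Int) :
    PySem.List.enumerate (xs.map f) s
    = (PySem.List.enumerate xs s).map (fun p => (p.1, f p.2)) := by
  induction xs generalizing s with
  | nil => simp [PySem.List.enumerate_nil]
  | cons x t ih => simp [PySem.List.enumerate_cons, ih]

theorem get_spatial_indices_eq (axis_list : List String) :
    get_spatial_indices axis_list = get_spatial_indices_alt axis_list := by
  simp only [get_spatial_indices, get_spatial_indices_alt, List.foldl_reverse]
  set nm : String → String := fun a => PySem.Str.lower (PySem.Str.strip a) with hnm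
  rw [foldr_eq_finds nm (PySem.List.enumerate axis_list 0)]
  rw [enumerate_map nm axis_list 0]
  rw [List.find?_map, List.find?_map]
  simp only [Function.comp_def, Option.map_map]
  set l := PySem.List.enumerate axis_list 0 with hl
  rcases hfx : l.find? (fun p => nm p.2 == "x" || nm p.2 == "lon" || nm p.2 == "longitude") with _ | px
  · simp [hfx]
  · rcases hfy : l.find? (fun p => nm p.2 == "y" || nm p.2 == "lat" || nm p.2 == "latitude") with _ | py
    · simp [hfx, hfy]
    · -- both found: show the indices differ, so A's guard passes
      have hpx := List.find?_some hfx
      have hpy := List.find?_some hfy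
      have hmx := List.mem_of_find?_eq_some hfx
      have hmy := List.mem_of_find?_eq_some hfy
      have hne : px.1 ≠ py.1 := by
        intro heq
        rw [PySem.List.mem_enumerate_iff] at hmx hmy
        obtain ⟨k, hk, hpk⟩ := hmx
        obtain ⟨k', hk', hpk'⟩ := hmy
        have hkk : (k : Int) = (k' : Int) := by
          have := heq; rw [hpk, hpk'] at this; simpa using this
        have : k = k' := by exact_mod_cast hkk
        subst this
        have h2 : px.2 = py.2 := by rw [hpk, hpk']
        rw [h2] at hpx
        have := xlike_not_ylike _ hpx
        rw [this] at hpy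
        exact Bool.false_ne_true hpy
      simp [hfx, hfy, hne]

-- ===== VERDICT (by name: the statement is the Claim_ definition above) =====
theorem get_spatial_indices_spec : Claim_equal_get_spatial_indices := by
  intro axis_list _
  unfold Spec_get_spatial_indices
  exact get_spatial_indices_eq axis_list
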